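-- pv_equiv track=rewrite | github.com/MrBrantCode/unitest_baseline | mut_generate/mist_train_cf/cf_6682/solution.py | assign_values
-- ===== SOURCE A (Python) =====
-- def assign_values(list_1, list_2):
--     """
--     Assign values from list_2 to list_1 such that the sum of elements in list_1 equals the sum of elements in list_2,
--     and the absolute difference between adjacent elements in list_1 is at least 2.
--
--     Args:
--     list_1 (list): The list to assign values to.
--     list_2 (list): The list to assign values from.
--
--     Returns:
--     list: The modified list_1.
--     """
--     list_2.sort()  # Sort list_2 in ascending order
--     half_len = len(list_2) // 2  # Calculate half the length of list_2
--     list_1 = []  # Initialize an empty list for the result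
--
--     # Assign the first element of list_2 to list_1
--     list_1.append(list_2[0])
--
--     # Assign the remaining elements to list_1 with a difference of at least 2
--     for i in range(1, half_len):
--         # Find the next element in list_2 that is at least 2 more than the last element in list_1
--         for j in range(i, len(list_2)):
--             if list_2[j] - list_1[-1] >= 2:
--                 list_1.append(list_2[j])
--                 break
--
--     return list_1
-- ===== SOURCE B (Python) =====
-- def assign_values(list_1, list_2):
--     # Two-pointer single forward scan over the sorted list (A rescans from i each time).
--     # Like A, this sorts list_2 in place; the return value is what is proved equivalent.
--     list_2.sort()
--     res = [list_2[0]]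
--     n = len(list_2)
--     j = 1
--     for _ in range(1, n // 2):
--         while j < n and list_2[j] - res[-1] < 2:
--             j += 1
--         if j < n:
--             res.append(list_2[j])
--             j += 1
--     return res
-- ===== Notes on version B (the rewrite author's own statement) =====
-- stated objective: faster
-- what changed: Replaces A's inner rescan (for each of the half_len-1 outer iterations, scan list_2 from index i for the first element >= last+2) by a single monotone two-pointer: one index j only moves forward across the sorted list, so the whole selection is one pass after sorting.
import Mathlib
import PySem

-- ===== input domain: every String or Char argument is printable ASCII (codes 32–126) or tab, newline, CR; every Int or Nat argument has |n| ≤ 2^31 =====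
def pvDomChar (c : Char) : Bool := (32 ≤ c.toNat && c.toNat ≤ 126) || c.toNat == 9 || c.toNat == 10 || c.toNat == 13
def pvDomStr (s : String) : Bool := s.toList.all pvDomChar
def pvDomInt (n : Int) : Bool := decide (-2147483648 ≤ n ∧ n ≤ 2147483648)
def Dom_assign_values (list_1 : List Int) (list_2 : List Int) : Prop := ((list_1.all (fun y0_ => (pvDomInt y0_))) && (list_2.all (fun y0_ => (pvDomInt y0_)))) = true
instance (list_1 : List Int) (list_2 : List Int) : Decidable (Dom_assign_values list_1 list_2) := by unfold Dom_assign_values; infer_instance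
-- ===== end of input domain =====

-- B replaces A's per-iteration rescan of the sorted list by a single forward-only
-- two-pointer pass (objective: faster). Both A and B sort list_2 in place in Python;
-- the equivalence proved here is about the return value.

-- ===== PORT A =====
-- inner loop 'for j in range(i, len(list_2)): if list_2[j]-last >= 2: append; break',
-- scanning the suffix list_2[i:] for the first qualifying element
def aScan (last : Int) : List Int → Option Int
  | [] => none
  | x :: xs => if x - last ≥ 2 then some x else aScan last xs

-- one iteration of A's outer loop; the accumulator is list_1 kept in REVERSED order
-- (head = list_1[-1]); the result is reversed back at the end
def aStep (s : List Int) (acc : List Int) (i : Nat) : List Int :=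
  match aScan (acc.headD 0) (s.drop i) with
  | some x => x :: acc
  | none => acc

def assign_values (list_1 : List Int) (list_2 : List Int) : List Int :=
  let s := PySem.List.sorted list_2 (fun x => x)
  match s with
  | [] => []  -- Python raises IndexError at list_2[0]; excluded by Pre_
  | s0 :: _ =>
    let half_len := s.length / 2
    ((List.range' 1 (half_len - 1)).foldl (aStep s) [s0]).reverse

-- ===== PORT B =====
-- the 'while j < n and list_2[j] - res[-1] < 2: j += 1' loop
def bWhile (s : List Int) (n : Nat) (last : Int) (j : Nat) : Nat :=
  if h : j < n ∧ s.getD j 0 - last < 2 then bWhile s n last (j + 1) else j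
  termination_by n - j
  decreasing_by omega

-- one iteration of B's loop; state = (j, res in reversed order)
def bStep (s : List Int) (n : Nat) (st : Nat × List Int) (_ : Nat) : Nat × List Int :=
  let j := bWhile s n (st.2.headD 0) st.1
  if j < n then (j + 1, s.getD j 0 :: st.2) else (j, st.2)

def assign_values_alt (list_1 : List Int) (list_2 : List Int) : List Int :=
  let s := PySem.List.sorted list_2 (fun x => x)
  match s with
  | [] => []  -- B's Python also raises IndexError here; excluded by Pre_
  | s0 :: _ =>
    let n := s.length
    (((List.range' 1 (n / 2 - 1)).foldl (bStep s n) (1, [s0])).2).reverse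

-- ===== PRECONDITION & SPEC =====
-- On list_2 = [] both Pythons raise IndexError at list_2[0]; Pre_ excludes exactly that.
def Pre_assign_values (list_1 : List Int) (list_2 : List Int) : Prop := list_2 ≠ []
instance (list_1 : List Int) (list_2 : List Int) : Decidable (Pre_assign_values list_1 list_2) := by unfold Pre_assign_values; infer_instance
def pvWitness_assign_values : List Int × List Int := ([], [1, 3, 5, 7])
def Spec_assign_values (list_1 : List Int) (list_2 : List Int) (out : List Int) : Prop := out = assign_values_alt list_1 list_2
instance (list_1 : List Int) (list_2 : List Int) (out : List Int) : Decidable (Spec_assign_values list_1 list_2 out) := by unfold Spec_assign_values; infer_instance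

-- ===== CLAIM (what is proved, stated in full; the proofs are below) =====
def Claim_equal_assign_values : Prop := ∀ (list_1 : List Int) (list_2 : List Int), Dom_assign_values list_1 list_2 → Pre_assign_values list_1 list_2 → Spec_assign_values list_1 list_2 (assign_values list_1 list_2)

-- ===== LEMMAS AND PROOFS =====

-- characterisation of bWhile: it returns the first index k ≥ j (capped at n) whose
-- element satisfies the ≥ 2 gap, and everything in [j, k) fails it
lemma bWhile_spec (s : List Int) (n : Nat) (last : Int) :
    ∀ j, j ≤ n →
      j ≤ bWhile s n last j ∧ bWhile s n last j ≤ n ∧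
      (∀ m, j ≤ m → m < bWhile s n last j → s.getD m 0 - last < 2) ∧
      (bWhile s n last j < n → ¬ (s.getD (bWhile s n last j) 0 - last < 2)) := by
  intro j
  induction' hd : n - j using Nat.strong_induction_on with d ih generalizing j
  intro hjn
  rw [bWhile]
  by_cases h : j < n ∧ s.getD j 0 - last < 2
  · rw [dif_pos h]
    obtain ⟨h1, h2, h3, h4⟩ := ih (n - (j + 1)) (by omega) (j + 1) rfl (by omega)
    refine ⟨by omega, h2, ?_, h4⟩
    intro m hm1 hm2
    rcases Nat.eq_or_lt_of_le hm1 with h' | h'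
    · rw [← h']; exact h.2
    · exact h3 m h' hm2
  · rw [dif_neg h]
    refine ⟨le_refl _, hjn, fun m hm1 hm2 => absurd hm1 (by omega), fun hlt hc => h ⟨hlt, hc⟩⟩

-- aScan of a suffix starting at or past the end is none
lemma aScan_drop_len (s : List Int) (last : Int) (i : Nat) (hi : s.length ≤ i) :
    aScan last (s.drop i) = none := by
  rw [List.drop_eq_nil_of_le hi]; rfl

-- aScan is insensitive to skipping a prefix of indices that all fail the gap test
lemma aScan_shift (s : List Int) (last : Int) :
    ∀ i k, i ≤ k → (∀ m, i ≤ m → m < k → s.getD m 0 - last < 2) →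
      aScan last (s.drop i) = aScan last (s.drop k) := by
  intro i k
  induction' hd : k - i using Nat.strong_induction_on with d ih generalizing i
  intro hik hfail
  rcases Nat.eq_or_lt_of_le hik with h | h
  · rw [h]
  · have step : aScan last (s.drop i) = aScan last (s.drop (i + 1)) := by
      by_cases hi : i < s.length
      · rw [List.drop_eq_getElem_cons hi]
        have hlt : s[i] - last < 2 := by
          have := hfail i (le_refl i) h
          rwa [List.getD_eq_getElem s 0 hi] at this
        simp [aScan, show ¬ (s[i] - last ≥ 2) by omega]
      · rw [List.drop_eq_nil_of_le (by omega), List.drop_eq_nil_of_le (by omega)]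
    rw [step]
    exact ih (k - (i + 1)) (by omega) (i + 1) rfl (by omega)
      (fun m hm1 hm2 => hfail m (by omega) hm2)

-- A's inner scan from index j computes exactly what bWhile finds from index j
lemma aScan_bWhile (s : List Int) (last : Int) (j : Nat) (hj : j ≤ s.length) :
    aScan last (s.drop j) =
      (if bWhile s s.length last j < s.length then some (s.getD (bWhile s s.length last j) 0) else none) := by
  obtain ⟨h1, h2, h3, h4⟩ := bWhile_spec s s.length last j hj
  set k := bWhile s s.length last j with hk
  rw [aScan_shift s last j k h1 h3]
  by_cases hkn : k < s.length
  · rw [List.drop_eq_getElem_cons hkn]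
    have hge : s[k] - last ≥ 2 := by
      have := h4 hkn
      rw [List.getD_eq_getElem s 0 hkn] at this
      omega
    simp [aScan, hge, hkn]
  · rw [List.drop_eq_nil_of_le (by omega)]
    simp [aScan, hkn]

-- the coupling invariant: A's fold from acc equals the acc-component of B's fold from (j, acc);
-- indices in [i, j) all fail the gap test against the current last element, and either the
-- A-side counter has not overtaken the B-side pointer or the pointer is exhausted
lemma fold_eq (s : List Int) :
    ∀ (cnt i j : Nat) (acc : List Int),
      (i ≤ j ∨ j = s.length) → j ≤ s.length →
      (∀ m, i ≤ m → m < j → s.getD m 0 - acc.headD 0 < 2) →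
      (List.range' i cnt).foldl (aStep s) acc =
        ((List.range' i cnt).foldl (bStep s s.length) (j, acc)).2 := by
  intro cnt
  induction cnt with
  | zero => intro i j acc _ _ _; simp
  | succ d ih =>
    intro i j acc hinv hjn hfail
    rw [List.range'_succ, List.foldl_cons, List.foldl_cons]
    obtain ⟨h1, h2, h3, h4⟩ := bWhile_spec s s.length (acc.headD 0) j hjn
    set k := bWhile s s.length (acc.headD 0) j with hk
    have hscan : aScan (acc.headD 0) (s.drop i) =
        (if k < s.length then some (s.getD k 0) else none) := by
      rcases hinv with hij | hjlen
      · rw [aScan_shift s (acc.headD 0) i j hij hfail]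
        rw [aScan_bWhile s (acc.headD 0) j hjn]
      · by_cases hij : i ≤ j
        · rw [aScan_shift s (acc.headD 0) i j hij hfail]
          rw [aScan_bWhile s (acc.headD 0) j hjn]
        · -- i is past the end of s, and so is j = s.length ≤ k
          have hkn : ¬ k < s.length := by omega
          rw [if_neg hkn, aScan_drop_len s (acc.headD 0) i (by omega)]
    have hstepA : aStep s acc i = (if k < s.length then s.getD k 0 :: acc else acc) := by
      unfold aStep
      rw [hscan]
      by_cases hkn : k < s.length
      · rw [if_pos hkn, if_pos hkn]
      · rw [if_neg hkn, if_neg hkn]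
    have hstepB : bStep s s.length (j, acc) i =
        (if k < s.length then (k + 1, s.getD k 0 :: acc) else (k, acc)) := by
      simp only [bStep, ← hk]
    by_cases hkn : k < s.length
    · rw [hstepA, hstepB, if_pos hkn, if_pos hkn]
      have hik : i ≤ k := by
        rcases hinv with hij | hjlen
        · omega
        · omega
      apply ih (i + 1) (k + 1) (s.getD k 0 :: acc) (Or.inl (by omega)) (by omega)
      intro m hm1 hm2
      simp only [List.headD_cons]
      have hge : ¬ (s.getD k 0 - acc.headD 0 < 2) := h4 hkn
      rcases Nat.lt_or_ge m j with hmj | hmj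
      · have := hfail m (by omega) hmj; omega
      · rcases Nat.lt_or_ge m k with hmk | hmk
        · have := h3 m hmj hmk; omega
        · have hmk' : m = k := by omega
          rw [hmk']; omega
    · rw [hstepA, hstepB, if_neg hkn, if_neg hkn]
      apply ih (i + 1) k acc (Or.inr (by omega)) h2
      intro m hm1 hm2
      rcases Nat.lt_or_ge m j with hmj | hmj
      · exact hfail m (by omega) hmj
      · exact h3 m hmj hm2

-- ===== VERDICT (by name: the statement is the Claim_ definition above) =====
theorem assign_values_spec : Claim_equal_assign_values := by
  intro list_1 list_2 _ _
  unfold Spec_assign_values assign_values assign_values_alt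
  cases h : PySem.List.sorted list_2 (fun x => x) with
  | nil => rfl
  | cons s0 rest =>
    simp only
    rw [fold_eq (s0 :: rest) ((s0 :: rest).length / 2 - 1) 1 1 [s0] (Or.inl (le_refl 1))
      (by simp) (fun m hm1 hm2 => absurd hm1 (by omega))]
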